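-- pv_equiv track=rewrite | github.com/speelbreaker12/opus-trader | scripts/suggest_downstream_patches.py | extract_patch_from_response
-- ===== SOURCE A (Python) =====
-- from typing import Dict, List, Optional
--
-- def extract_patch_from_response(response: str) -> Optional[str]:
--     """
--     Extract unified diff patch from Claude's response.
--
--     Handles responses that might include extra text before/after the diff.
--     """
--     lines = response.split("\n")
--     patch_lines = []
--     in_patch = False
--
--     for line in lines:
--         # Start of patch
--         if line.startswith("--- "):
--             in_patch = True
--             patch_lines = [line]
--         elif in_patch:
--             # End of patch (blank line or non-patch content after hunks)
--             if line.startswith("```"):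
--                 break
--             patch_lines.append(line)
--
--     if not patch_lines:
--         return None
--
--     return "\n".join(patch_lines)
-- ===== SOURCE B (Python) =====
-- def extract_patch_from_response(response):
--     """Extract unified diff patch from response text (marker-index search + slice)."""
--     lines = response.split("\n")
--     first = next((i for i, l in enumerate(lines) if l.startswith("--- ")), None)
--     if first is None:
--         return None
--     end = next((i for i in range(first + 1, len(lines))
--                 if lines[i].startswith("```")), len(lines))
--     seg = lines[first:end]
--     rel = next(i for i, l in enumerate(reversed(seg)) if l.startswith("--- "))
--     last = len(seg) - 1 - rel
--     return "\n".join(seg[last:])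
-- ===== Notes on version B (the rewrite author's own statement) =====
-- stated objective: alternative
-- what changed: Replaced A's stateful line-by-line accumulator (in_patch flag, reset-on-'--- ', break-on-'```') by three marker-index searches (first '--- ', first '```' after it, last '--- ' before that) and a single slice+join.
import Mathlib
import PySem

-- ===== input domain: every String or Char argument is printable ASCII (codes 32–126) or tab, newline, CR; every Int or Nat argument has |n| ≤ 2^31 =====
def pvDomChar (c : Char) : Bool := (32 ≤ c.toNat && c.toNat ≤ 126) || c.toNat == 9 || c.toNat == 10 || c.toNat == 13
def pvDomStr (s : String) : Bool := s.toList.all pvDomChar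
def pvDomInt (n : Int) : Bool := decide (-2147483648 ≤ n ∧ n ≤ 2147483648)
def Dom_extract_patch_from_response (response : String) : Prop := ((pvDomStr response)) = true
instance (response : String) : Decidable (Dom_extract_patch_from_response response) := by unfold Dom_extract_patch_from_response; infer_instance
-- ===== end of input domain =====

-- B replaces A's stateful line accumulator with marker-index searches plus one slice; same return value everywhere (no speed claim).

-- ===== PORT A =====
def pvIsDash (l : String) : Bool := PySem.Str.startswith l "--- "
def pvIsTick (l : String) : Bool := PySem.Str.startswith l "```"

-- A's for-loop: state (patch_lines, in_patch); 'break' returns the accumulator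
def pvLoopA : List String → List String → Bool → List String
  | [], acc, _ => acc
  | l :: rest, acc, inp =>
    if pvIsDash l then pvLoopA rest [l] true
    else if inp then
      (if pvIsTick l then acc else pvLoopA rest (acc ++ [l]) inp)
    else pvLoopA rest acc inp

def extract_patch_from_response (response : String) : Option String :=
  let lines := (PySem.Str.split? response "\n").getD []
  let patch_lines := pvLoopA lines [] false
  if patch_lines.isEmpty then none
  else some (PySem.Str.join "\n" patch_lines)

-- ===== PORT B =====
def extract_patch_from_response_alt (response : String) : Option String :=
  let lines := (PySem.Str.split? response "\n").getD []
  match List.findIdx? pvIsDash lines with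
  | none => none
  | some f =>
    let e := match List.findIdx? pvIsTick (lines.drop (f+1)) with
             | some j => f + 1 + j
             | none => lines.length
    let seg := (lines.take e).drop f
    let last := seg.length - 1 - List.findIdx pvIsDash seg.reverse
    some (PySem.Str.join "\n" (seg.drop last))

-- ===== PRECONDITION & SPEC =====
def Spec_extract_patch_from_response (response : String) (out : Option String) : Prop := out = extract_patch_from_response_alt response
instance (response : String) (out : Option String) : Decidable (Spec_extract_patch_from_response response out) := by unfold Spec_extract_patch_from_response; infer_instance

-- ===== CLAIM (what is proved, stated in full; the proofs are below) =====
def Claim_equal_extract_patch_from_response : Prop := ∀ (response : String), Dom_extract_patch_from_response response → Spec_extract_patch_from_response response (extract_patch_from_response response)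

-- ===== LEMMAS AND PROOFS =====

-- a line cannot start with both "--- " and "```"
lemma pvDash_not_tick (l : String) (h : pvIsDash l = true) : pvIsTick l = false := by
  simp only [pvIsDash, pvIsTick, PySem.Str.startswith_eq, PySem.Chars.startswith_iff] at *
  rcases h with ⟨t, ht⟩
  by_contra hb
  rw [Bool.not_eq_false, PySem.Chars.startswith_iff] at hb
  rcases hb with ⟨u, hu⟩
  rw [← hu] at ht
  rw [show "--- ".toList = ['-','-','-',' '] from by decide,
      show "```".toList = ['`','`','`'] from by decide] at ht
  simp at ht

-- index of the LAST element satisfying p, if any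
def pvLastIdx? (p : String → Bool) : List String → Option Nat
  | [] => none
  | l :: rest =>
    match pvLastIdx? p rest with
    | some k => some (k + 1)
    | none => if p l then some 0 else none

lemma pvLastIdx?_lt_length (p : String → Bool) (xs : List String) (k : Nat)
    (h : pvLastIdx? p xs = some k) : k < xs.length := by
  induction xs generalizing k with
  | nil => simp [pvLastIdx?] at h
  | cons l rest ih =>
    simp only [pvLastIdx?] at h
    cases hr : pvLastIdx? p rest with
    | some k' => rw [hr] at h; simp at h; subst h; simpa using Nat.succ_lt_succ (ih _ hr)
    | none =>
      rw [hr] at h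
      by_cases hp : p l <;> simp [hp] at h
      subst h; simp

lemma pvLastIdx?_reverse (p : String → Bool) (xs : List String) :
    List.findIdx? p xs.reverse = (pvLastIdx? p xs).map (fun k => xs.length - 1 - k) := by
  induction xs with
  | nil => simp [pvLastIdx?]
  | cons l rest ih =>
    simp only [List.reverse_cons, List.findIdx?_append, ih, pvLastIdx?]
    cases hr : pvLastIdx? p rest with
    | some k =>
      have hk := pvLastIdx?_lt_length p rest k hr
      simp only [Option.map_some, List.length_cons]
      rw [Option.or_of_isSome (by simp)]
      congr 1
      omega
    | none =>
      by_cases hp : p l <;>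
        simp [Option.or, hp, List.findIdx?_cons, List.findIdx?_nil]

-- characterization of A's loop in the in_patch state
lemma pvLoopA_true (rest acc : List String) :
    pvLoopA rest acc true =
      (let seg := rest.take ((List.findIdx? pvIsTick rest).getD rest.length)
       match pvLastIdx? pvIsDash seg with
       | some k => seg.drop k
       | none => acc ++ seg) := by
  induction rest generalizing acc with
  | nil => simp [pvLoopA, pvLastIdx?]
  | cons l rest ih =>
    by_cases hd : pvIsDash l
    · have ht : pvIsTick l = false := pvDash_not_tick l hd
      simp only [pvLoopA, hd, if_true, List.findIdx?_cons, ht, Bool.false_eq_true, if_false]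
      rw [ih]
      cases hfi : List.findIdx? pvIsTick rest with
      | some j =>
        simp only [hfi, Option.map_some, Option.getD, List.length_cons,
          List.take_succ_cons, pvLastIdx?]
        cases hr : pvLastIdx? pvIsDash (rest.take j) with
        | some k => simp [hr]
        | none => simp [hr, hd]
      | none =>
        simp only [hfi, Option.map_none, Option.getD, List.length_cons,
          List.take_succ_cons, List.take_length, pvLastIdx?]
        cases hr : pvLastIdx? pvIsDash rest with
        | some k => simp [hr]
        | none => simp [hr, hd]
    · by_cases ht : pvIsTick l
      · simp [pvLoopA, hd, ht, List.findIdx?_cons, pvLastIdx?]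
      · simp only [pvLoopA, hd, Bool.false_eq_true, if_false, ht, if_true]
        rw [ih]
        simp only [List.findIdx?_cons, ht, Bool.false_eq_true, if_false]
        cases hfi : List.findIdx? pvIsTick rest with
        | some j =>
          simp only [hfi, Option.map_some, Option.getD, List.length_cons,
            List.take_succ_cons, pvLastIdx?]
          cases hr : pvLastIdx? pvIsDash (rest.take j) with
          | some k => simp [hr]
          | none => simp [hr, hd, List.append_assoc]
        | none =>
          simp only [hfi, Option.map_none, Option.getD, List.length_cons,
            List.take_succ_cons, List.take_length, pvLastIdx?]
          cases hr : pvLastIdx? pvIsDash rest with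
          | some k => simp [hr]
          | none => simp [hr, hd, List.append_assoc]

-- A's loop result equals B's marker-index slice, at the level of line lists
lemma pvMain (ls : List String) :
    pvLoopA ls [] false =
      (match List.findIdx? pvIsDash ls with
       | none => []
       | some f =>
         let e := match List.findIdx? pvIsTick (ls.drop (f+1)) with
                  | some j => f + 1 + j
                  | none => ls.length
         let seg := (ls.take e).drop f
         match pvLastIdx? pvIsDash seg with
         | some k => seg.drop k
         | none => seg) := by
  induction ls with
  | nil => simp [pvLoopA]
  | cons l rest ih =>
    by_cases hd : pvIsDash l
    · simp only [List.findIdx?_cons, hd, if_true]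
      rw [show pvLoopA (l :: rest) [] false = pvLoopA rest [l] true by simp [pvLoopA, hd]]
      rw [pvLoopA_true]
      simp only [List.drop_succ_cons, List.drop_zero, List.length_cons, Nat.zero_add]
      cases hfi : List.findIdx? pvIsTick rest with
      | some j =>
        simp only [Option.getD, Nat.add_comm 1 j, List.take_succ_cons, pvLastIdx?]
        cases hr : pvLastIdx? pvIsDash (rest.take j) with
        | some k => simp [hr]
        | none => simp [hr, hd]
      | none =>
        simp only [Option.getD, List.take_succ_cons, List.drop_zero, List.take_length,
          pvLastIdx?]
        cases hr : pvLastIdx? pvIsDash rest with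
        | some k => simp [hr]
        | none => simp [hr, hd]
    · rw [show pvLoopA (l :: rest) [] false = pvLoopA rest [] false by
        simp [pvLoopA, hd]]
      rw [ih]
      simp only [List.findIdx?_cons, hd, Bool.false_eq_true, if_false]
      cases hf : List.findIdx? pvIsDash rest with
      | none => simp
      | some f =>
        simp only [Option.map_some, List.drop_succ_cons, List.length_cons]
        cases hfi : List.findIdx? pvIsTick (rest.drop (f+1)) with
        | some j =>
          simp only
          rw [show f + 1 + 1 + j = (f + 1 + j) + 1 from by omega, List.take_succ_cons,
            List.drop_succ_cons]
        | none =>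
          simp only
          rw [show rest.length + 1 = rest.length + 1 from rfl, List.take_succ_cons,
            List.take_length, List.drop_succ_cons]

-- lifting pvMain through the isEmpty test and join
lemma pvTop (ls : List String) :
    (if (pvLoopA ls [] false).isEmpty then none
     else some (PySem.Str.join "\n" (pvLoopA ls [] false))) =
      (match List.findIdx? pvIsDash ls with
       | none => none
       | some f =>
         let e := match List.findIdx? pvIsTick (ls.drop (f+1)) with
                  | some j => f + 1 + j
                  | none => ls.length
         let seg := (ls.take e).drop f
         let last := seg.length - 1 - List.findIdx pvIsDash seg.reverse
         some (PySem.Str.join "\n" (seg.drop last))) := by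
  rw [pvMain]
  cases hf : List.findIdx? pvIsDash ls with
  | none => simp
  | some f =>
    simp only
    set e := (match List.findIdx? pvIsTick (ls.drop (f+1)) with
              | some j => f + 1 + j
              | none => ls.length) with he
    set seg := (ls.take e).drop f with hseg
    cases hr : pvLastIdx? pvIsDash seg with
    | none =>
      -- impossible: seg begins with the dash line ls[f]
      exfalso
      have hfl := List.findIdx?_eq_some_iff_findIdx_eq.mp hf
      have hflen : f < ls.length := hfl.1
      have hdash : pvIsDash (ls[f]!) = true := by
        have := List.findIdx?_eq_some_iff_getElem.mp hf
        rcases this with ⟨hlt, hp, -⟩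
        simpa [List.getElem!_eq_getElem?_getD, List.getElem?_eq_getElem hlt] using hp
      have hfe : f < e := by
        rw [he]
        cases hfi : List.findIdx? pvIsTick (ls.drop (f+1)) with
        | some j => show f < f + 1 + j; omega
        | none => simpa [hfi] using hflen
      have hft : f < (ls.take e).length := by
        simp [List.length_take]
        omega
      have hseg2 : seg = (ls.take e)[f] :: (ls.take e).drop (f+1) := by
        rw [hseg]
        exact List.drop_eq_getElem_cons hft
      have hget : (ls.take e)[f] = ls[f] := List.getElem_take
      rw [hseg2] at hr
      simp only [pvLastIdx?] at hr
      cases hx : pvLastIdx? pvIsDash ((ls.take e).drop (f+1)) with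
      | some k => rw [hx] at hr; simp at hr
      | none =>
        rw [hx] at hr
        rw [hget] at hr
        have : pvIsDash ls[f] = true := by
          simpa [List.getElem!_eq_getElem?_getD, List.getElem?_eq_getElem hflen] using hdash
        simp [this] at hr
    | some k =>
      have hk := pvLastIdx?_lt_length pvIsDash seg k hr
      rw [List.findIdx_eq_getD_findIdx?, pvLastIdx?_reverse, hr]
      simp only [Option.map_some, Option.getD, List.length_reverse]
      rw [show seg.length - 1 - (seg.length - 1 - k) = k from by omega]
      have hne : (seg.drop k).isEmpty = false := by
        rw [List.isEmpty_eq_false_iff, Ne, List.drop_eq_nil_iff]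
        omega
      simp [hne]

-- ===== VERDICT (by name: the statement is the Claim_ definition above) =====
theorem extract_patch_from_response_spec : Claim_equal_extract_patch_from_response := by
  intro response _
  unfold Spec_extract_patch_from_response extract_patch_from_response extract_patch_from_response_alt
  exact pvTop _
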